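-- pv_equiv track=rewrite | github.com/bar-ang/ProjectEulerSolutions | python/516_5_smooth_totients.py | iterate_square_free
-- ===== SOURCE A (Python) =====
-- def iterate_square_free(lim, primes, i=None):
--     if i is None:
--         i = len(primes)
--     if i == 1:
--         return [primes[0]]
--
--     inner = iterate_square_free(lim, primes, i=i-1)
--     inner.sort()
--     p = primes[i-1]
--     if p > lim:
--         return inner
--     y = []
--     for t in inner:
--         if  t * p > lim:
--             break
--         y.append(t * p)
--     return inner + y + [p]
-- ===== SOURCE B (Python) =====
-- def _merge(a, b):
--     out = []
--     ia = ib = 0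
--     while ia < len(a) and ib < len(b):
--         if b[ib] < a[ia]:
--             out.append(b[ib]); ib += 1
--         else:
--             out.append(a[ia]); ia += 1
--     out.extend(a[ia:])
--     out.extend(b[ib:])
--     return out
--
-- def _products(s, p, lim):
--     y = []
--     for t in s:
--         if t * p > lim:
--             break
--         y.append(t * p)
--     return y
--
-- def iterate_square_free(lim, primes, i=None):
--     if i is None:
--         i = len(primes)
--     if i == 1:
--         return [primes[0]]
--     s = [primes[0]]          # kept sorted across levels
--     for k in range(1, i - 1):
--         p = primes[k]
--         if p <= lim:
--             s = _merge(s, sorted(_products(s, p, lim) + [p]))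
--     p = primes[i - 1]
--     if p > lim:
--         return s
--     return s + _products(s, p, lim) + [p]
-- ===== Notes on version B (the rewrite author's own statement) =====
-- stated objective: alternative
-- what changed: The recursion with a full sort of the whole inner list at every level is replaced by an iterative loop that keeps its state sorted incrementally: per level it sorts only the small new run of products and merges it in linearly.
import Mathlib
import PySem

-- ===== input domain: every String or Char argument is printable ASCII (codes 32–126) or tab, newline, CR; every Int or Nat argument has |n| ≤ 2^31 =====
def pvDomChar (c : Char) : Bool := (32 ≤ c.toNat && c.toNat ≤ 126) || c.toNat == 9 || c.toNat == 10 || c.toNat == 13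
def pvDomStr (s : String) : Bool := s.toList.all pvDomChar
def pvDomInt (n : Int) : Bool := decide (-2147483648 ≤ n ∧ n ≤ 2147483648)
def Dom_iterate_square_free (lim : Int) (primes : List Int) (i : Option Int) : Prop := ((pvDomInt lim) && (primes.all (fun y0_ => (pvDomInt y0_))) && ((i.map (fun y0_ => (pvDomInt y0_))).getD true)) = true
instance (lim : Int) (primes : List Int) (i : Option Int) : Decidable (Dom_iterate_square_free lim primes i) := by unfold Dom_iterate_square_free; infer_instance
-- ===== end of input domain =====

-- B replaces A's recursion-with-full-sort-per-level by an iterative loop that keeps the state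
-- sorted incrementally, sorting only the small new run and merging it in linearly (alternative
-- algorithm; return value only — A sorts its recursive result in place, not observable here).


-- ===== PORT A =====
-- the 'for t in inner: if t*p > lim: break; y.append(t*p)' loop
def aProducts (lim p : Int) : List Int → List Int
  | [] => []
  | t :: ts => if t * p > lim then [] else t * p :: aProducts lim p ts

-- the recursion of A on the (positive) level counter i; n = i
def aRec (lim : Int) (primes : List Int) : Nat → List Int
  | 0 => []      -- unreachable: Python diverges for i ≤ 0 (excluded by Pre_)
  | n + 1 =>
    if n = 0 then [(PySem.List.pyGet? primes 0).getD 0]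
    else
      let inner := PySem.List.sorted (aRec lim primes n) (fun x => x) false
      let p := (PySem.List.pyGet? primes (n : Int)).getD 0
      if p > lim then inner
      else inner ++ aProducts lim p inner ++ [p]

def iterate_square_free (lim : Int) (primes : List Int) (i : Option Int) : List Int :=
  let j := i.getD (primes.length : Int)
  if j ≤ 0 then [] else aRec lim primes j.toNat   -- j ≤ 0: Python diverges (excluded by Pre_)

-- ===== PORT B =====
-- Source B _merge: the two-index while loop as structural recursion
def bMerge : List Int → List Int → List Int
  | a, [] => a
  | [], y :: b => y :: b
  | x :: a, y :: b =>
    if y < x then y :: bMerge (x :: a) b else x :: bMerge a (y :: b)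

-- Source B _products
def bProducts (s : List Int) (p lim : Int) : List Int :=
  match s with
  | [] => []
  | t :: ts => if t * p > lim then [] else t * p :: bProducts ts p lim

-- one iteration of Source B's for-loop body
def bStep (lim : Int) (primes : List Int) (s : List Int) (k : Int) : List Int :=
  let p := (PySem.List.pyGet? primes k).getD 0
  if p ≤ lim then
    bMerge s (PySem.List.sorted (bProducts s p lim ++ [p]) (fun x => x) false)
  else s

def iterate_square_free_alt (lim : Int) (primes : List Int) (i : Option Int) : List Int :=
  let j := i.getD (primes.length : Int)
  if j = 1 then [(PySem.List.pyGet? primes 0).getD 0]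
  else
    let s := (PySem.List.pyRange 1 (j - 1) 1).foldl (bStep lim primes)
               [(PySem.List.pyGet? primes 0).getD 0]
    let p := (PySem.List.pyGet? primes (j - 1)).getD 0
    if p > lim then s
    else s ++ bProducts s p lim ++ [p]

-- ===== PRECONDITION & SPEC =====
-- Pre_ excludes exactly the inputs where Python A raises: empty primes (IndexError at the
-- base case) and an explicit i outside 1..len(primes) (RecursionError for i ≤ 0, IndexError for i > len).
def Pre_iterate_square_free (lim : Int) (primes : List Int) (i : Option Int) : Prop :=
  primes ≠ [] ∧ 1 ≤ i.getD (primes.length : Int) ∧ i.getD (primes.length : Int) ≤ (primes.length : Int)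
instance (lim : Int) (primes : List Int) (i : Option Int) : Decidable (Pre_iterate_square_free lim primes i) := by unfold Pre_iterate_square_free; infer_instance

def pvWitness_iterate_square_free : Int × List Int × Option Int := (30, [2, 3, 5], none)

def Spec_iterate_square_free (lim : Int) (primes : List Int) (i : Option Int) (out : List Int) : Prop := out = iterate_square_free_alt lim primes i
instance (lim : Int) (primes : List Int) (i : Option Int) (out : List Int) : Decidable (Spec_iterate_square_free lim primes i out) := by unfold Spec_iterate_square_free; infer_instance

-- ===== CLAIM (what is proved, stated in full; the proofs are below) =====
def Claim_equal_iterate_square_free : Prop := ∀ (lim : Int) (primes : List Int) (i : Option Int), Dom_iterate_square_free lim primes i → Pre_iterate_square_free lim primes i → Spec_iterate_square_free lim primes i (iterate_square_free lim primes i)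

-- ===== LEMMAS AND PROOFS =====

theorem bProducts_eq_aProducts (lim p : Int) (s : List Int) :
    bProducts s p lim = aProducts lim p s := by
  induction s with
  | nil => rfl
  | cons t ts ih => simp [bProducts, aProducts, ih]

theorem bMerge_perm (a b : List Int) : (bMerge a b).Perm (a ++ b) := by
  fun_induction bMerge a b with
  | case1 a => simp
  | case2 y b => simp
  | case3 x a y b hlt ih =>
    exact (ih.cons y).trans (List.perm_middle.symm.trans (by simp))
  | case4 x a y b hlt ih => exact ih.cons x

theorem mem_bMerge {z : Int} {a b : List Int} :
    z ∈ bMerge a b ↔ z ∈ a ∨ z ∈ b := by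
  have := (bMerge_perm a b).mem_iff (a := z)
  simpa using this

theorem bMerge_pairwise {a b : List Int}
    (ha : a.Pairwise (· ≤ ·)) (hb : b.Pairwise (· ≤ ·)) :
    (bMerge a b).Pairwise (· ≤ ·) := by
  fun_induction bMerge a b with
  | case1 a => exact ha
  | case2 y b => exact hb
  | case3 x a y b hlt ih =>
    rw [List.pairwise_cons] at ha hb
    refine List.pairwise_cons.2 ⟨?_, ih (List.pairwise_cons.2 ha) hb.2⟩
    intro z hz
    rcases mem_bMerge.1 hz with hz | hz
    · rcases List.mem_cons.1 hz with rfl | hz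
      · omega
      · have := ha.1 z hz; omega
    · exact hb.1 z hz
  | case4 x a y b hnlt ih =>
    rw [List.pairwise_cons] at ha hb
    refine List.pairwise_cons.2 ⟨?_, ih ha.2 (List.pairwise_cons.2 hb)⟩
    intro z hz
    rcases mem_bMerge.1 hz with hz | hz
    · exact ha.1 z hz
    · rcases List.mem_cons.1 hz with rfl | hz
      · omega
      · have := hb.1 z hz; omega

-- core invariant: B's fold state equals A's sorted recursion level
theorem fold_inv (lim : Int) (primes : List Int) (n : Nat) (hn : 1 ≤ n) :
    (PySem.List.pyRange 1 (n : Int) 1).foldl (bStep lim primes)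
        [(PySem.List.pyGet? primes 0).getD 0]
      = PySem.List.sorted (aRec lim primes n) (fun x => x) false := by
  induction n, hn using Nat.le_induction with
  | base =>
    rw [PySem.List.pyRange_one_eq_nil (by norm_num)]
    rw [show aRec lim primes 1 = [(PySem.List.pyGet? primes 0).getD 0] from rfl]
    simp only [List.foldl_nil]
    exact (PySem.List.sorted_eq_self_of_pairwise _ _ (List.pairwise_singleton _ _)).symm
  | succ n hn ih =>
    have hcast : ((n + 1 : Nat) : Int) = (n : Int) + 1 := by push_cast; ring
    rw [hcast, PySem.List.pyRange_one_succ_right (by exact_mod_cast hn),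
        List.foldl_append, ih]
    conv_rhs => rw [aRec]
    rw [if_neg (by omega)]
    set G := PySem.List.sorted (aRec lim primes n) (fun x => x) false with hG
    have Gpw : G.Pairwise (· ≤ ·) := PySem.List.sorted_pairwise _ _
    set p := (PySem.List.pyGet? primes (n : Int)).getD 0 with hp
    simp only [List.foldl_cons, List.foldl_nil]
    have hbstep : bStep lim primes G (n : Int) =
        if p ≤ lim then
          bMerge G (PySem.List.sorted (bProducts G p lim ++ [p]) (fun x => x) false)
        else G := rfl
    rw [hbstep]
    by_cases hple : p ≤ lim
    · rw [if_pos hple, if_neg (by omega : ¬ p > lim), bProducts_eq_aProducts]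
      set y := aProducts lim p G with hy
      set r := PySem.List.sorted (y ++ [p]) (fun x => x) false with hr
      have rpw : r.Pairwise (· ≤ ·) := PySem.List.sorted_pairwise _ _
      have rperm : r.Perm (y ++ [p]) := PySem.List.sorted_perm _ _ _
      refine (PySem.List.sorted_id_eq_of_perm_of_pairwise _ _ ?_ ?_).symm
      · refine (bMerge_perm _ _).trans ?_
        refine (List.Perm.append_left G rperm).trans ?_
        rw [← List.append_assoc]
      · exact bMerge_pairwise Gpw rpw
    · rw [if_neg hple, if_pos (by omega : p > lim)]
      exact (PySem.List.sorted_sorted _ _).symm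

-- ===== VERDICT (by name: the statement is the Claim_ definition above) =====
theorem iterate_square_free_spec : Claim_equal_iterate_square_free := by
  intro lim primes i hdom hpre
  obtain ⟨hne, h1, h2⟩ := hpre
  have hlen : 1 ≤ (primes.length : Int) := by
    have : primes.length ≠ 0 := fun h => hne (List.eq_nil_of_length_eq_zero h)
    omega
  unfold Spec_iterate_square_free iterate_square_free iterate_square_free_alt
  simp only []
  set j := i.getD (primes.length : Int) with hj
  rw [if_neg (by omega : ¬ j ≤ 0)]
  by_cases hj1 : j = 1
  · rw [if_pos hj1, hj1]
    rfl
  · rw [if_neg hj1]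
    have hn1 : 1 ≤ j.toNat - 1 := by omega
    have hjt : j.toNat = (j.toNat - 1) + 1 := by omega
    rw [hjt]
    have hcast : ((j.toNat - 1 : Nat) : Int) = j - 1 := by omega
    have hA : aRec lim primes ((j.toNat - 1) + 1) =
        (let inner := PySem.List.sorted (aRec lim primes (j.toNat - 1)) (fun x => x) false
         let p := (PySem.List.pyGet? primes ((j.toNat - 1 : Nat) : Int)).getD 0
         if p > lim then inner else inner ++ aProducts lim p inner ++ [p]) := by
      rw [aRec, if_neg (by omega)]
    rw [hA]
    simp only [← fold_inv lim primes (j.toNat - 1) hn1, hcast, bProducts_eq_aProducts]
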